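-- pv_equiv track=rewrite | github.com/Ice-Moca/SNUCSE | Algorithm(retake)/HW1/python/src/hw1.py | check_selection
-- ===== SOURCE A (Python) =====
-- from typing import List
--
-- def check_selection(arr: List[int], i: int, result: int) -> bool:
--     """
--     Verifies the correctness of the selected element.
--
--     This function checks in linear time whether result is indeed an i-th smallest element
--     in the array.
--
--     Parameters:
--         arr (List[int]): The array containing the elements.
--         i (int): The 1-based order of the element to verify.
--         result (int): The element that has been selected.
--
--     Returns:
--         bool: True if result is an i-th smallest element in arr, False otherwise.
--     """
--     # check if the result is the i-th smallest element
--     # need to act in O(n) time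
--     smaller = 0
--     equal = 0
--     for num in arr:
--         if num < result:
--             smaller += 1
--         elif num == result:
--             equal += 1
--     return smaller < i <= smaller + equal
-- ===== SOURCE B (Python) =====
-- def check_selection(arr, i, result):
--     sorted_arr = sorted(arr)
--     return 1 <= i <= len(arr) and sorted_arr[i - 1] == result
-- ===== Notes on version B (the rewrite author's own statement) =====
-- stated objective: simpler
-- what changed: Replaces the smaller/equal counting pass with sorting the array once and checking the element at position i-1 of the sorted list.
import Mathlib
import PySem

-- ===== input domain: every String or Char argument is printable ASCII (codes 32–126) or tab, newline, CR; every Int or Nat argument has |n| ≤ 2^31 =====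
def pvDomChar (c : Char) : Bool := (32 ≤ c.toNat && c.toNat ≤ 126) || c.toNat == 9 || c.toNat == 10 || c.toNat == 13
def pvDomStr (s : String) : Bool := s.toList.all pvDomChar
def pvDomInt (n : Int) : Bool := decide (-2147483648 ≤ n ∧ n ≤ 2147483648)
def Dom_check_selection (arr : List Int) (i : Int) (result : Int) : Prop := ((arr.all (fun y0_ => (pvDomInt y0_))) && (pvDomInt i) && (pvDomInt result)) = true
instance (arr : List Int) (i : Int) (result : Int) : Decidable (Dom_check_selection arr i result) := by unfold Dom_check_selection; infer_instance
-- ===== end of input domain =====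

-- B replaces A's smaller/equal counting pass by sorting the array and checking the
-- element at position i-1 of the sorted copy (objective: simpler).

-- ===== PORT A =====
-- loop: smaller/equal accumulated over arr, then return smaller < i <= smaller + equal
def check_selection (arr : List Int) (i : Int) (result : Int) : Bool :=
  let st := arr.foldl
    (fun (st : Int × Int) num =>
      if num < result then (st.1 + 1, st.2)
      else if num == result then (st.1, st.2 + 1)
      else st) (0, 0)
  decide (st.1 < i ∧ i ≤ st.1 + st.2)

-- ===== PORT B =====
-- sorted_arr = sorted(arr); return 1 <= i <= len(arr) and sorted_arr[i-1] == result
def check_selection_alt (arr : List Int) (i : Int) (result : Int) : Bool :=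
  let sorted_arr := PySem.List.sorted arr (fun x => x) false
  if 1 ≤ i ∧ i ≤ (arr.length : Int) then
    match PySem.List.pyGet? sorted_arr (i - 1) with
    | some v => v == result
    | none => false
  else false

-- ===== PRECONDITION & SPEC =====
def Spec_check_selection (arr : List Int) (i : Int) (result : Int) (out : Bool) : Prop := out = check_selection_alt arr i result
instance (arr : List Int) (i : Int) (result : Int) (out : Bool) : Decidable (Spec_check_selection arr i result out) := by unfold Spec_check_selection; infer_instance

-- ===== CLAIM (what is proved, stated in full; the proofs are below) =====
def Claim_equal_check_selection : Prop := ∀ (arr : List Int) (i : Int) (result : Int), Dom_check_selection arr i result → Spec_check_selection arr i result (check_selection arr i result)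

-- ===== LEMMAS AND PROOFS =====

-- A's fold computes the counts of elements < result and = result.
theorem foldl_counts (arr : List Int) (r : Int) (a b : Int) :
    arr.foldl
      (fun (st : Int × Int) num =>
        if num < r then (st.1 + 1, st.2)
        else if num == r then (st.1, st.2 + 1)
        else st) (a, b)
    = (a + (arr.countP (fun x => decide (x < r)) : Int),
       b + (arr.count r : Int)) := by
  induction arr generalizing a b with
  | nil => simp
  | cons x t ih =>
    simp only [List.foldl_cons]
    by_cases h1 : x < r
    · have h2 : x ≠ r := by omega
      rw [if_pos h1, ih]
      simp only [List.countP_cons, List.count_cons, h1, h2, decide_true,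
        beq_iff_eq, if_false, if_true, Prod.mk.injEq]
      constructor <;> push_cast <;> omega
    · by_cases h2 : x = r
      · rw [if_neg h1, if_pos (by simp [h2]), ih]
        simp only [List.countP_cons, List.count_cons, h1, h2, Prod.mk.injEq]
        constructor <;> push_cast <;> simp <;> omega
      · rw [if_neg h1, if_neg (by simp [h2]), ih]
        simp [List.countP_cons, List.count_cons, h1, h2]

-- In a ≤-sorted list, a downward-closed predicate holds at index k iff k < countP.
theorem sorted_index_countP (s : List Int) (hs : s.Pairwise (· ≤ ·)) (p : Int → Bool)
    (hmono : ∀ x y : Int, x ≤ y → p y = true → p x = true) :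
    ∀ (k : Nat) (hk : k < s.length), (p s[k] = true ↔ k < s.countP p) := by
  induction s with
  | nil => intro k hk; simp at hk
  | cons a t ih =>
    rcases List.pairwise_cons.mp hs with ⟨ha, ht⟩
    intro k hk
    cases k with
    | zero =>
      simp only [List.getElem_cons_zero, List.countP_cons]
      constructor
      · intro hpa; simp [hpa]
      · intro hpos
        by_cases hpa : p a = true
        · exact hpa
        · rw [if_neg hpa] at hpos
          rcases List.countP_pos_iff.mp hpos with ⟨x, hx, hpx⟩
          exact absurd (hmono a x (ha x hx) hpx) hpa
    | succ k =>
      simp only [List.getElem_cons_succ, List.countP_cons]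
      have hk' : k < t.length := by simpa using hk
      have iht := ih ht k hk'
      constructor
      · intro hp
        have hpa : p a = true := hmono a t[k] (ha _ (t.getElem_mem hk')) hp
        have := iht.mp hp
        rw [if_pos hpa]
        omega
      · intro hlt
        apply iht.mpr
        by_cases hpa : p a = true
        · rw [if_pos hpa] at hlt; omega
        · rw [if_neg hpa] at hlt; omega

theorem countP_le_split (s : List Int) (r : Int) :
    s.countP (fun x => decide (x ≤ r))
      = s.countP (fun x => decide (x < r)) + s.count r := by
  induction s with
  | nil => simp
  | cons x t ih =>
    simp only [List.countP_cons, List.count_cons, ih, beq_iff_eq]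
    rcases lt_trichotomy x r with h | h | h
    · have h1 : x ≤ r := le_of_lt h
      have h2 : x ≠ r := ne_of_lt h
      simp [h, h1, h2]; omega
    · subst h
      simp
      omega
    · have h1 : ¬ x ≤ r := not_le.mpr h
      have h2 : ¬ x < r := by omega
      have h3 : x ≠ r := ne_of_gt h
      simp [h1, h2, h3]

-- ===== VERDICT (by name: the statement is the Claim_ definition above) =====
theorem check_selection_spec : Claim_equal_check_selection := by
  intro arr i result _
  unfold Spec_check_selection check_selection check_selection_alt
  simp only [foldl_counts, zero_add]
  set s := PySem.List.sorted arr (fun x => x) false with hsdef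
  have hperm : s.Perm arr := PySem.List.sorted_perm arr (fun x => x) false
  have hlen : s.length = arr.length := hperm.length_eq
  have hsorted : s.Pairwise (· ≤ ·) := by
    simpa using PySem.List.sorted_pairwise arr (fun x => x)
  have hltc : s.countP (fun x => decide (x < result)) = arr.countP (fun x => decide (x < result)) :=
    hperm.countP_eq _
  have hcnt : s.count result = arr.count result := hperm.count_eq _
  have hboundle : arr.countP (fun x => decide (x < result)) + arr.count result ≤ arr.length := by
    rw [← countP_le_split]; exact List.countP_le_length
  by_cases hg : 1 ≤ i ∧ i ≤ (arr.length : Int)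
  · rw [if_pos hg]
    have hk0 : 0 ≤ i - 1 := by omega
    set k := (i - 1).toNat with hkdef
    have hknat : ((k : Nat) : Int) = i - 1 := Int.toNat_of_nonneg hk0
    have hk : k < s.length := by rw [hlen]; omega
    have hget : PySem.List.pyGet? s (i - 1) = some s[k] := by
      rw [← hknat]
      simp [PySem.List.pyGet?_natCast, List.getElem?_eq_getElem hk]
    rw [hget]
    have hle := sorted_index_countP s hsorted (fun x => decide (x ≤ result))
      (by intro x y hxy hp; simp at hp ⊢; omega) k hk
    have hlt' := sorted_index_countP s hsorted (fun x => decide (x < result))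
      (by intro x y hxy hp; simp at hp ⊢; omega) k hk
    simp only [decide_eq_true_eq] at hle hlt'
    rw [countP_le_split, hltc, hcnt] at hle
    rw [hltc] at hlt'
    have hiff : (s[k] = result) ↔
        ((arr.countP (fun x => decide (x < result)) : Int) < i ∧
         i ≤ (arr.countP (fun x => decide (x < result)) : Int) + (arr.count result : Int)) := by
      constructor
      · intro he
        have h1 := hle.mp (le_of_eq he)
        have h3 : ¬ s[k] < result := by omega
        have h4 : ¬ k < arr.countP (fun x => decide (x < result)) := fun hh => h3 (hlt'.mpr hh)
        omega
      · rintro ⟨hA, hB⟩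
        have h1 : s[k] ≤ result := hle.mpr (by omega)
        have h2 : ¬ s[k] < result := fun hh => by have := hlt'.mp hh; omega
        omega
    apply Bool.eq_iff_iff.mpr
    simp only [decide_eq_true_eq, beq_iff_eq]
    exact hiff.symm
  · rw [if_neg hg]
    simp only [decide_eq_false_iff_not]
    rintro ⟨h1, h2⟩
    exact hg ⟨by omega, by omega⟩
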